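-- pv_equiv track=rewrite | github.com/EdwardAdelin/bioInformatics | lab11/ex2.py | build_transition_counts
-- ===== SOURCE A (Python) =====
-- def build_transition_counts(text):
--     words = text.split()
--     counts = {}
--     vocab = set(words)
--
--     # Initialize simple counts
--     for i in range(len(words) - 1):
--         curr_w, next_w = words[i], words[i+1]
--         if curr_w not in counts: counts[curr_w] = {}
--         if next_w not in counts[curr_w]: counts[curr_w][next_w] = 0
--         counts[curr_w][next_w] += 1
--     return counts, vocab
-- ===== SOURCE B (Python) =====
-- def build_transition_counts(text):
--     words = text.split()
--     pairs = list(zip(words, words[1:]))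
--     counts = {
--         c: {n: pairs.count((c, n))
--             for n in dict.fromkeys(n2 for c2, n2 in pairs if c2 == c)}
--         for c in dict.fromkeys(c2 for c2, _ in pairs)
--     }
--     return counts, set(words)
-- ===== Notes on version B (the rewrite author's own statement) =====
-- stated objective: alternative
-- what changed: B replaces A's single index loop that mutates a nested dict with a declarative nested dict-comprehension: it forms the adjacent-pair list once, and for each distinct first word (in first-occurrence order) builds its inner dict from the distinct successors with pairs.count((c,n)) as the value.
import Mathlib
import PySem

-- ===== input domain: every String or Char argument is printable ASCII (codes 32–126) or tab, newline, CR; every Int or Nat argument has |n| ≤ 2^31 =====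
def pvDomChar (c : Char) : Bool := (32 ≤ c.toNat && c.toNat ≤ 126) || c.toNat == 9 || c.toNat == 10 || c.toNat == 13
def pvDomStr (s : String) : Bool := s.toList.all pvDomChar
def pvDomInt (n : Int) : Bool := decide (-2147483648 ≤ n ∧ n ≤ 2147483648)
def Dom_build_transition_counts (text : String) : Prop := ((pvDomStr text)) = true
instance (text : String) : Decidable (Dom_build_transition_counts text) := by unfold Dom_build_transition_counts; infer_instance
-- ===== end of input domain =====

-- B builds the nested counts declaratively (pair list + nested dict comprehension counting with pairs.count) instead of A's index loop mutating a nested dict; alternative decomposition, not faster.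

-- ===== PORT A =====
-- the body of A's for-loop (locals curr_w, next_w are the two parameters)
def pvStepA (d : PySem.Dict String (PySem.Dict String Int)) (curr_w next_w : String) :
    PySem.Dict String (PySem.Dict String Int) :=
  let d := if d.contains curr_w then d else d.insert curr_w PySem.Dict.empty
  let inner := d.getD curr_w PySem.Dict.empty
  let inner := if inner.contains next_w then inner else inner.insert next_w 0
  d.insert curr_w (inner.insert next_w (inner.getD next_w 0 + 1))

def build_transition_counts (text : String) : (List (String × List (String × Int))) × List String :=
  let words := PySem.Str.split₀ text
  let counts :=
    (PySem.List.pyRange 0 ((words.length : Int) - 1) 1).foldl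
      (fun d i => pvStepA d (PySem.List.pyGetD words i "") (PySem.List.pyGetD words (i + 1) ""))
      PySem.Dict.empty
  (counts.items.map (fun p => (p.1, p.2.items)), PySem.Set.ofList words)

-- ===== PORT B =====
-- inner dict comprehension: {n: pairs.count((c, n)) for n in dict.fromkeys(n2 for c2, n2 in pairs if c2 == c)}
def pvInnerB (pairs : List (String × String)) (c : String) : List (String × Int) :=
  (PySem.List.dedup ((pairs.filter (fun p => p.1 == c)).map Prod.snd)).map
    (fun n => (n, (PySem.List.count pairs (c, n) : Int)))

def build_transition_counts_alt (text : String) : (List (String × List (String × Int))) × List String :=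
  let words := PySem.Str.split₀ text
  let pairs := words.zip (PySem.List.slice words (some 1) none)
  let counts := (PySem.List.dedup (pairs.map Prod.fst)).map (fun c => (c, pvInnerB pairs c))
  (counts, PySem.Set.ofList words)

-- ===== PRECONDITION & SPEC =====
def Spec_build_transition_counts (text : String) (out : (List (String × List (String × Int))) × List String) : Prop := out = build_transition_counts_alt text
instance (text : String) (out : (List (String × List (String × Int))) × List String) : Decidable (Spec_build_transition_counts text out) := by unfold Spec_build_transition_counts; infer_instance

-- ===== CLAIM (what is proved, stated in full; the proofs are below) =====
def Claim_equal_build_transition_counts : Prop := ∀ (text : String), Dom_build_transition_counts text → Spec_build_transition_counts text (build_transition_counts text)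

-- ===== LEMMAS AND PROOFS =====

-- the dict A has built after processing the pair list qs, expressed in B's closed form
def pvCD (qs : List (String × String)) : PySem.Dict String (PySem.Dict String Int) :=
  PySem.Dict.mk ((PySem.List.dedup (qs.map Prod.fst)).map (fun c => (c, PySem.Dict.mk (pvInnerB qs c))))

theorem pv_get?_mk_map {β : Type} (xs : List String) (g : String → β) (c : String) :
    (PySem.Dict.mk (xs.map (fun x => (x, g x)))).get? c = if c ∈ xs then some (g c) else none := by
  induction xs with
  | nil => simp [PySem.Dict.get?]
  | cons a tl ih =>
    rw [List.map_cons, PySem.Dict.get?_mk_cons]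
    by_cases h : a = c
    · subst h; simp
    · have h2 : ¬ c = a := fun hc => h hc.symm
      simp [h, h2, beq_iff_eq, ih]

theorem pv_contains_mk_map {β : Type} (xs : List String) (g : String → β) (c : String) :
    (PySem.Dict.mk (xs.map (fun x => (x, g x)))).contains c = decide (c ∈ xs) := by
  rw [PySem.Dict.contains_eq_isSome_get?, pv_get?_mk_map]
  by_cases h : c ∈ xs <;> simp [h]

theorem pv_getD_mk_map (xs : List String) (g : String → Int) (c : String) :
    (PySem.Dict.mk (xs.map (fun x => (x, g x)))).getD c 0 = if c ∈ xs then g c else 0 := by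
  rw [PySem.Dict.getD_eq_get?_getD, pv_get?_mk_map]
  by_cases h : c ∈ xs <;> simp [h]

theorem pv_dedup_append_mem {α : Type} [DecidableEq α] (xs : List α) (x : α) (h : x ∈ xs) :
    PySem.List.dedup (xs ++ [x]) = PySem.List.dedup xs := by
  simp only [PySem.List.dedup_eq_ofList, PySem.Set.ofList_eq_foldl, List.foldl_append,
    List.foldl_cons, List.foldl_nil]
  rw [← PySem.Set.ofList_eq_foldl]
  simp [PySem.Set.add, PySem.Set.mem_ofList, h]

theorem pv_dedup_append_not_mem {α : Type} [DecidableEq α] (xs : List α) (x : α) (h : x ∉ xs) :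
    PySem.List.dedup (xs ++ [x]) = PySem.List.dedup xs ++ [x] := by
  simp only [PySem.List.dedup_eq_ofList, PySem.Set.ofList_eq_foldl, List.foldl_append,
    List.foldl_cons, List.foldl_nil]
  rw [← PySem.Set.ofList_eq_foldl]
  simp [PySem.Set.add, PySem.Set.mem_ofList, h]

-- the inner-dict update of A's loop body, in closed form
theorem pv_inner_step (qs : List (String × String)) (c n : String) :
    (let I := PySem.Dict.mk (pvInnerB qs c);
     let I1 := if I.contains n then I else I.insert n 0;
     I1.insert n (I1.getD n 0 + 1)) = PySem.Dict.mk (pvInnerB (qs ++ [(c, n)]) c) := by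
  have hsec : ((qs ++ [(c,n)]).filter (fun p => p.1 == c)).map Prod.snd
      = (qs.filter (fun p => p.1 == c)).map Prod.snd ++ [n] := by simp
  set sec := (qs.filter (fun p => p.1 == c)).map Prod.snd with hsecdef
  have hmemsec : n ∈ PySem.List.dedup sec ↔ n ∈ sec := PySem.List.mem_dedup sec n
  show (let I := PySem.Dict.mk ((PySem.List.dedup sec).map (fun m => (m, (PySem.List.count qs (c, m) : Int))));
     let I1 := if I.contains n then I else I.insert n 0;
     I1.insert n (I1.getD n 0 + 1)) = PySem.Dict.mk (pvInnerB (qs ++ [(c, n)]) c)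
  by_cases hn : n ∈ sec
  · -- n already a key
    have hc : (PySem.Dict.mk ((PySem.List.dedup sec).map (fun m => (m, (PySem.List.count qs (c, m) : Int))))).contains n = true := by
      rw [pv_contains_mk_map]; simp [hn]
    simp only [hc, if_true]
    rw [pv_getD_mk_map, if_pos (hmemsec.mpr hn)]
    apply PySem.Dict.ext
    rw [PySem.Dict.items_insert, hc, if_pos rfl]
    show _ = pvInnerB (qs ++ [(c, n)]) c
    rw [pvInnerB, hsec, pv_dedup_append_mem _ _ hn]
    simp only [List.map_map]
    apply List.map_congr_left
    intro m hm
    by_cases hmn : m = n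
    · subst hmn
      simp [PySem.List.count_eq]
    · have hne : ¬ ((c,n) = (c,m)) := fun h => hmn (congrArg Prod.snd h).symm
      simp [hmn, PySem.List.count_eq, List.count_append, hne, beq_iff_eq]
  · -- n is new
    have hcount0 : List.count (c,n) qs = 0 := by
      rw [List.count_eq_zero]
      intro hm
      exact hn (List.mem_map.mpr ⟨(c,n), List.mem_filter.mpr ⟨hm, by simp⟩, rfl⟩)
    have hc : (PySem.Dict.mk ((PySem.List.dedup sec).map (fun m => (m, (PySem.List.count qs (c, m) : Int))))).contains n = false := by
      rw [pv_contains_mk_map]; simp [hn]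
    simp only [hc, Bool.false_eq_true, if_false]
    rw [PySem.Dict.getD_insert_self, PySem.Dict.insert_insert_self]
    apply PySem.Dict.ext
    rw [PySem.Dict.items_insert, hc]
    simp only [Bool.false_eq_true, if_false]
    show _ = pvInnerB (qs ++ [(c, n)]) c
    rw [pvInnerB, hsec, pv_dedup_append_not_mem _ _ hn]
    rw [List.map_append]
    congr 1
    · apply List.map_congr_left
      intro m hm
      have hmn : m ≠ n := fun h => hn (hmemsec.mp (h ▸ hm))
      have hne : ¬ ((c,n) = (c,m)) := fun h => hmn (congrArg Prod.snd h).symm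
      simp [PySem.List.count_eq, List.count_append, hne]
    · simp [PySem.List.count_eq, List.count_append, hcount0]

theorem pv_innerB_append_ne (qs : List (String × String)) (c n x : String) (h : x ≠ c) :
    pvInnerB (qs ++ [(c, n)]) x = pvInnerB qs x := by
  have hf : (qs ++ [(c,n)]).filter (fun p => p.1 == x) = qs.filter (fun p => p.1 == x) := by
    have h2 : ¬ c = x := fun hh => h hh.symm
    simp [List.filter_append, h2]
  rw [pvInnerB, pvInnerB, hf]
  apply List.map_congr_left
  intro m hm
  have hne : ¬ ((c,n) = (x,m)) := fun hh => h (congrArg Prod.fst hh).symm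
  simp [PySem.List.count_eq, List.count_append, hne]

theorem pv_step (qs : List (String × String)) (c n : String) :
    pvStepA (pvCD qs) c n = pvCD (qs ++ [(c, n)]) := by
  have hfst : (qs ++ [(c,n)]).map Prod.fst = qs.map Prod.fst ++ [c] := by simp
  have hcontains : (pvCD qs).contains c = decide (c ∈ qs.map Prod.fst) := by
    rw [pvCD, pv_contains_mk_map]
    simp
  by_cases hc : c ∈ qs.map Prod.fst
  · -- existing outer key
    have hct : (pvCD qs).contains c = true := by rw [hcontains]; simp [hc]
    have hget : (pvCD qs).getD c PySem.Dict.empty = PySem.Dict.mk (pvInnerB qs c) := by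
      rw [pvCD, PySem.Dict.getD_eq_get?_getD, pv_get?_mk_map]
      simp [hc]
    rw [pvStepA]
    simp only [hct, if_true, hget]
    rw [pv_inner_step]
    apply PySem.Dict.ext
    rw [PySem.Dict.items_insert, hct, if_pos rfl]
    show _ = (PySem.List.dedup ((qs ++ [(c,n)]).map Prod.fst)).map
        (fun x => (x, PySem.Dict.mk (pvInnerB (qs ++ [(c,n)]) x)))
    rw [hfst, pv_dedup_append_mem _ _ hc]
    show ((PySem.List.dedup (qs.map Prod.fst)).map (fun x => (x, PySem.Dict.mk (pvInnerB qs x)))).map _ = _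
    rw [List.map_map]
    apply List.map_congr_left
    intro x hx
    by_cases hxc : x = c
    · subst hxc; simp
    · have hbne : ¬ (x == c) = true := by simp [hxc]
      simp only [Function.comp]
      rw [if_neg hbne, pv_innerB_append_ne _ _ _ _ hxc]
  · -- new outer key
    have hcf : (pvCD qs).contains c = false := by rw [hcontains]; simp [hc]
    have hcf2 : ((pvCD qs).insert c PySem.Dict.empty).getD c PySem.Dict.empty = PySem.Dict.empty :=
      PySem.Dict.getD_insert_self _ _ _ _
    rw [pvStepA]
    simp only [hcf, Bool.false_eq_true, if_false, hcf2]
    have hempty : (PySem.Dict.empty : PySem.Dict String Int).contains n = false := by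
      simp [PySem.Dict.contains_empty]
    simp only [hempty, Bool.false_eq_true, if_false]
    rw [PySem.Dict.getD_insert_self, PySem.Dict.insert_insert_self, PySem.Dict.insert_insert_self]
    have hcount0 : List.count (c,n) qs = 0 := by
      rw [List.count_eq_zero]
      intro hm
      exact hc (List.mem_map.mpr ⟨(c,n), hm, rfl⟩)
    have hfempty : (qs ++ [(c,n)]).filter (fun p => p.1 == c) = [(c,n)] := by
      rw [List.filter_append]
      have : qs.filter (fun p => p.1 == c) = [] := by
        rw [List.filter_eq_nil_iff]
        intro p hp hbeq
        exact hc (List.mem_map.mpr ⟨p, hp, by simpa using hbeq⟩)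
      simp [this]
    apply PySem.Dict.ext
    rw [PySem.Dict.items_insert, hcf]
    simp only [Bool.false_eq_true, if_false]
    show (pvCD qs).items ++ [(c, PySem.Dict.empty.insert n (0 + 1))]
        = (PySem.List.dedup ((qs ++ [(c,n)]).map Prod.fst)).map
            (fun x => (x, PySem.Dict.mk (pvInnerB (qs ++ [(c,n)]) x)))
    rw [hfst, pv_dedup_append_not_mem _ _ hc, List.map_append]
    congr 1
    · show ((PySem.List.dedup (qs.map Prod.fst)).map (fun x => (x, PySem.Dict.mk (pvInnerB qs x)))) = _
      apply List.map_congr_left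
      intro x hx
      have hxc : x ≠ c := fun h => hc (h ▸ ((PySem.List.mem_dedup _ _).mp hx))
      rw [pv_innerB_append_ne _ _ _ _ hxc]
    · have hinner : pvInnerB (qs ++ [(c,n)]) c = [(n, 1)] := by
        rw [pvInnerB, hfempty]
        simp [PySem.List.count_eq, List.count_append, hcount0]
        exact PySem.Set.ofList_eq_self_of_nodup _ (by simp)
      simp only [List.map_cons, List.map_nil, hinner]
      have hone : (PySem.Dict.empty : PySem.Dict String Int).insert n (0 + 1) = PySem.Dict.mk [(n, 1)] := by
        apply PySem.Dict.ext
        rw [PySem.Dict.items_insert, hempty]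
        simp [PySem.Dict.empty]
      rw [hone]

theorem pv_fold (ps : List (String × String)) :
    ∀ qs, ps.foldl (fun d p => pvStepA d p.1 p.2) (pvCD qs) = pvCD (qs ++ ps) := by
  induction ps with
  | nil => intro qs; simp
  | cons p rest ih =>
    intro qs
    rw [List.foldl_cons]
    have hstep : pvStepA (pvCD qs) p.1 p.2 = pvCD (qs ++ [p]) := by
      rw [pv_step]
    rw [hstep, ih (qs ++ [p])]
    simp

theorem pv_range_aux {α : Type} (f : α → String → String → α) :
    ∀ (ws : List String) (init : α),
    (List.range (ws.length - 1)).foldl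
      (fun d k => f d (ws.getD k "") (ws.getD (k + 1) "")) init
    = (ws.zip ws.tail).foldl (fun d p => f d p.1 p.2) init := by
  intro ws
  induction ws with
  | nil => intro init; simp
  | cons w tl ih =>
    intro init
    cases tl with
    | nil => simp
    | cons w2 rest =>
      have hlen : (w :: w2 :: rest).length - 1 = rest.length + 1 := by simp
      rw [hlen, List.range_succ_eq_map]
      simp only [List.foldl_cons, List.foldl_map, List.getD_cons_zero, List.getD_cons_succ,
        List.zip_cons_cons, List.tail_cons]
      exact ih (f init w w2)

theorem pv_range_pairs {α : Type} (f : α → String → String → α) (ws : List String) (init : α) :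
    (PySem.List.pyRange 0 ((ws.length : Int) - 1) 1).foldl
      (fun d i => f d (PySem.List.pyGetD ws i "") (PySem.List.pyGetD ws (i + 1) "")) init
    = (ws.zip ws.tail).foldl (fun d p => f d p.1 p.2) init := by
  have hr : PySem.List.pyRange 0 ((ws.length : Int) - 1) 1
      = (List.range (ws.length - 1)).map (fun k => Int.ofNat k) := by
    rw [PySem.List.pyRange_one]
    have : (((ws.length : Int) - 1) - 0).toNat = ws.length - 1 := by omega
    rw [this]
    exact List.map_congr_left (fun k _ => by simp)
  rw [hr, List.foldl_map, ← pv_range_aux f ws init]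
  congr 1
  funext d k
  have h1 : PySem.List.pyGetD ws (k : Int) "" = ws.getD k "" := by
    rw [PySem.List.pyGetD_natCast]
  have h2 : PySem.List.pyGetD ws ((k : Int) + 1) "" = ws.getD (k + 1) "" := by
    rw [show ((k : Int) + 1) = ((k + 1 : Nat) : Int) by push_cast; ring, PySem.List.pyGetD_natCast]
  rw [show Int.ofNat k = (k : Int) from rfl, h1, h2]

-- ===== VERDICT (by name: the statement is the Claim_ definition above) =====
theorem build_transition_counts_spec : Claim_equal_build_transition_counts := by
  intro text _
  unfold Spec_build_transition_counts build_transition_counts build_transition_counts_alt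
  dsimp only
  rw [PySem.List.slice_from_one]
  rw [pv_range_pairs pvStepA (PySem.Str.split₀ text) PySem.Dict.empty]
  rw [show (PySem.Dict.empty : PySem.Dict String (PySem.Dict String Int)) = pvCD [] from rfl]
  rw [pv_fold ((PySem.Str.split₀ text).zip (PySem.Str.split₀ text).tail) []]
  rw [List.nil_append, pvCD]
  simp [List.map_map, Function.comp]
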